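-- pv_equiv track=rewrite | github.com/r-oleg-official/intro_python | seminar-03/sem-03_ex-03.py | search_str
-- ===== SOURCE A (Python) =====
-- def search_str (base_string, find_str):
--     res_index = 0
--     count = 0
--     for i in range(len(base_string)):
--         if find_str == base_string[i]:
--             res_index = i
--             count += 1
--     if count <= 1:
--         res_index = -1
--     return res_index
-- ===== SOURCE B (Python) =====
-- def search_str(base_string, find_str):
--     # Scan from the end: the first match found is the true last occurrence;
--     # stop as soon as a second match confirms that the element repeats.
--     last = -1
--     count = 0
--     for i in range(len(base_string) - 1, -1, -1):
--         if base_string[i] == find_str: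
--             if count == 0:
--                 last = i
--             count += 1
--             if count == 2:
--                 return last
--     return -1
-- ===== Notes on version B (the rewrite author's own statement) =====
-- stated objective: alternative
-- what changed: B scans backwards from the end with early exit: the first match seen is the true last occurrence and scanning stops once a second match proves repetition, instead of A's full forward pass maintaining the latest index and a total count.
import Mathlib
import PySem

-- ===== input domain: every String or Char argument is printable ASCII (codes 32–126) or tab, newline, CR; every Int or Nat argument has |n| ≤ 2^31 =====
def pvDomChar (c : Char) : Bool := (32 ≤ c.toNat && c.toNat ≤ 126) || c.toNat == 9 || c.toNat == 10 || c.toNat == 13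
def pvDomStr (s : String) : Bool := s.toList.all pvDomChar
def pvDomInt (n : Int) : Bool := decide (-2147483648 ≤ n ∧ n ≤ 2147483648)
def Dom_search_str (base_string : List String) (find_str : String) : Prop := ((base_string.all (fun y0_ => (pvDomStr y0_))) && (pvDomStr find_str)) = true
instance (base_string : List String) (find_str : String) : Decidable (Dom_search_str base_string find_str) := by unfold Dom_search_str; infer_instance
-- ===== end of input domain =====

-- B replaces A's full forward scan with a backward scan that records the first match seen (the true last occurrence) and stops at a second match; same return value, alternative decomposition.

-- ===== PORT A =====
def search_str (base_string : List String) (find_str : String) : Int :=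
  let st := (PySem.List.pyRange 0 base_string.length 1).foldl
    (fun (p : Int × Int) i =>
      if find_str == PySem.List.pyGetD base_string i "" then (i, p.2 + 1) else p)
    (0, 0)
  if st.2 ≤ 1 then -1 else st.1

-- ===== PORT B =====
-- loop 'for i in range(len-1, -1, -1)' as structural recursion on the index;
-- i+1 is the number of indices still to visit, so base_string.getD i "" is index i (always in range here).
def searchGo (base_string : List String) (find_str : String) : Nat → Int → Int → Int
  | 0, _, _ => -1
  | i + 1, last, count =>
    if base_string.getD i "" == find_str then
      let last' := if count == 0 then (i : Int) else last
      if count + 1 == 2 then last'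
      else searchGo base_string find_str i last' (count + 1)
    else searchGo base_string find_str i last count

def search_str_alt (base_string : List String) (find_str : String) : Int :=
  searchGo base_string find_str base_string.length (-1) 0

-- ===== PRECONDITION & SPEC =====
def Spec_search_str (base_string : List String) (find_str : String) (out : Int) : Prop := out = search_str_alt base_string find_str
instance (base_string : List String) (find_str : String) (out : Int) : Decidable (Spec_search_str base_string find_str out) := by unfold Spec_search_str; infer_instance

-- ===== CLAIM (what is proved, stated in full; the proofs are below) =====
def Claim_equal_search_str : Prop := ∀ (base_string : List String) (find_str : String), Dom_search_str base_string find_str → Spec_search_str base_string find_str (search_str base_string find_str)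

-- ===== LEMMAS AND PROOFS =====

-- forward characterisation of A's loop state after k iterations: (res_index, count)
def fwd (base_string : List String) (find_str : String) : Nat → Int × Int
  | 0 => (0, 0)
  | k + 1 =>
    let p := fwd base_string find_str k
    if find_str == base_string.getD k "" then ((k : Int), p.2 + 1) else p

theorem fwd_snd_nonneg (bs : List String) (fs : String) (k : Nat) :
    0 ≤ (fwd bs fs k).2 := by
  induction k with
  | zero => simp [fwd]
  | succ k ih => simp only [fwd]; split <;> (try dsimp only) <;> omega

theorem foldA_eq_fwd (bs : List String) (fs : String) (k : Nat) :
    (PySem.List.pyRange 0 k 1).foldl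
      (fun (p : Int × Int) i =>
        if fs == PySem.List.pyGetD bs i "" then (i, p.2 + 1) else p) (0, 0)
    = fwd bs fs k := by
  induction k with
  | zero => simp [fwd]
  | succ k ih =>
    have h : (PySem.List.pyRange 0 ((k : Int) + 1) 1)
        = PySem.List.pyRange 0 k 1 ++ [(k : Int)] := by
      simpa using PySem.List.pyRange_one_succ_right (a := 0) (b := (k : Nat)) (by positivity)
    have hk : ((k : Int) + 1) = ((k + 1 : Nat) : Int) := by push_cast; ring
    rw [← hk, h, List.foldl_append, ih]
    simp [fwd, PySem.List.pyGetD_natCast]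

theorem go_one (bs : List String) (fs : String) (k : Nat) (last : Int) :
    searchGo bs fs k last 1 = if 1 ≤ (fwd bs fs k).2 then last else -1 := by
  induction k generalizing last with
  | zero => simp [searchGo, fwd]
  | succ k ih =>
    simp only [searchGo, fwd, List.getD]
    by_cases h : bs[k]?.getD "" = fs
    · have := fwd_snd_nonneg bs fs k
      simp [h]
      omega
    · have h' : ¬ fs = bs[k]?.getD "" := fun e => h e.symm
      simp [h, h', ih]

theorem go_zero (bs : List String) (fs : String) (k : Nat) :
    searchGo bs fs k (-1) 0 = if 2 ≤ (fwd bs fs k).2 then (fwd bs fs k).1 else -1 := by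
  induction k with
  | zero => simp [searchGo, fwd]
  | succ k ih =>
    simp only [searchGo, fwd, List.getD]
    by_cases h : bs[k]?.getD "" = fs
    · have := fwd_snd_nonneg bs fs k
      simp [h, go_one]
      split <;> split <;> omega
    · have h' : ¬ fs = bs[k]?.getD "" := fun e => h e.symm
      simp [h, h', ih]

-- ===== VERDICT (by name: the statement is the Claim_ definition above) =====
theorem search_str_spec : Claim_equal_search_str := by
  intro bs fs _
  unfold Spec_search_str search_str search_str_alt
  rw [foldA_eq_fwd, go_zero]
  have := fwd_snd_nonneg bs fs bs.length
  dsimp only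
  split <;> split <;> omega
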